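-- pv_equiv track=rewrite | github.com/microsoft/LMOps | se2/src/utils/top_utils.py | deformat_serialized
-- ===== SOURCE A (Python) =====
-- def deformat_serialized(formatted):
--   """Undoes the process in format_serialized."""
--   lf_toks = []
--   in_label = False  # Whether we are processing the intent/slot label
--   for tok in formatted.replace("]", " ]").split():
--     if in_label:
--       if tok == "=":
--         in_label = False
--       else:
--         lf_toks.append("_" + tok.upper())
--     else:
--       if tok[0] == "[":
--         lf_toks.append(" " + tok + ":")
--         in_label = True
--       else:
--         lf_toks.append(" " + tok)
--   return "".join(lf_toks).replace(":_", ":").strip()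
-- ===== SOURCE B (Python) =====
-- def deformat_serialized(formatted):
--   """Undoes the process in format_serialized."""
--   toks = formatted.replace("]", " ]").split()
--   parts = []
--   while True:
--     # split off the plain tokens before the next '['-opener
--     j = 0
--     while j < len(toks) and toks[j][0] != "[":
--       j += 1
--     parts += [" " + t for t in toks[:j]]
--     if j == len(toks):
--       break
--     opener, rest = toks[j], toks[j + 1:]
--     # the label tokens run up to the first '=' (skipped) or the end
--     k = 0
--     while k < len(rest) and rest[k] != "=":
--       k += 1
--     parts += [" " + opener + ":"] + ["_" + t.upper() for t in rest[:k]]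
--     toks = rest[k + 1:]
--   return "".join(parts).replace(":_", ":").strip()
-- ===== Notes on version B (the rewrite author's own statement) =====
-- stated objective: alternative
-- what changed: Replaced A's token-by-token state machine (one fold carrying an in_label flag) by a staged find-and-slice decomposition: repeatedly locate the next '['-opener, emit the whole plain prefix as one slice, locate the next '=', emit the whole label slice uppercased, and continue after it; no per-token mode flag exists.
import Mathlib
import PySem

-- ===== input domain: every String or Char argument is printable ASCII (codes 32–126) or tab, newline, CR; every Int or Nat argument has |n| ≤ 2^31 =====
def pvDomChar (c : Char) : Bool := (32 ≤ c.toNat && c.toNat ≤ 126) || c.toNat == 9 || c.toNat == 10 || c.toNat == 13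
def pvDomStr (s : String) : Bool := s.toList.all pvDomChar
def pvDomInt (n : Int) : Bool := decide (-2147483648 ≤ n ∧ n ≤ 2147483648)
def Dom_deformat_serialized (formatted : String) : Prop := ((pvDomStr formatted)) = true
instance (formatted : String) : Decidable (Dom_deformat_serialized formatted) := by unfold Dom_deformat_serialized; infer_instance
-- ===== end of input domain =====

-- B replaces A's token-by-token flag state machine by a staged find-and-slice loop: it repeatedly
-- scans for the next '['-opener, emits the plain prefix in one slice, then scans for the next '='
-- and emits the whole label slice uppercased; same output, same cost (objective: alternative).

-- ===== PORT A =====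
-- A's loop body, one step of the fold over tokens; state = (lf_toks, in_label)
def pvStepA (st : List String × Bool) (tok : String) : List String × Bool :=
  if st.2 then
    if tok = "=" then (st.1, false)
    else (st.1 ++ ["_" ++ PySem.Str.upper tok], true)
  else
    if PySem.List.pyGet? tok.toList 0 = some '[' then (st.1 ++ [" " ++ tok ++ ":"], true)
    else (st.1 ++ [" " ++ tok], false)

def deformat_serialized (formatted : String) : String :=
  let toks := PySem.Str.split₀ (PySem.Str.replace formatted "]" " ]")
  let st := toks.foldl pvStepA ([], false)
  PySem.Str.strip (PySem.Str.replace (PySem.Str.join "" st.1) ":_" ":")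

-- ===== PORT B =====
-- Source B's predicates: `toks[j][0] != "["` (plain token) and `rest[k] != "="` (label token)
def pvNotOpen (t : String) : Bool := !(PySem.List.pyGet? t.toList 0 == some '[')
def pvNotEq (t : String) : Bool := !(t == "=")

-- Source B's outer while loop: slice off the plain prefix, the opener, the label slice up to '=', repeat
def pvChunksB (toks : List String) : List String :=
  match hrest : toks.dropWhile pvNotOpen with
  | [] => (toks.takeWhile pvNotOpen).map (fun t => " " ++ t)
  | opener :: rest' =>
    (toks.takeWhile pvNotOpen).map (fun t => " " ++ t) ++ [" " ++ opener ++ ":"]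
      ++ (rest'.takeWhile pvNotEq).map (fun t => "_" ++ PySem.Str.upper t)
      ++ pvChunksB ((rest'.dropWhile pvNotEq).tail)
termination_by toks.length
decreasing_by
  have h1 : (toks.dropWhile pvNotOpen).length ≤ toks.length := toks.length_dropWhile_le pvNotOpen
  have h2 : (rest'.dropWhile pvNotEq).length ≤ rest'.length := rest'.length_dropWhile_le pvNotEq
  have h3 : ((rest'.dropWhile pvNotEq).tail).length = (rest'.dropWhile pvNotEq).length - 1 :=
    (rest'.dropWhile pvNotEq).length_tail
  rw [hrest] at h1
  simp at h1
  omega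

def deformat_serialized_alt (formatted : String) : String :=
  let toks := PySem.Str.split₀ (PySem.Str.replace formatted "]" " ]")
  PySem.Str.strip (PySem.Str.replace (PySem.Str.join "" (pvChunksB toks)) ":_" ":")

-- ===== PRECONDITION & SPEC =====
def Spec_deformat_serialized (formatted : String) (out : String) : Prop := out = deformat_serialized_alt formatted
instance (formatted : String) (out : String) : Decidable (Spec_deformat_serialized formatted out) := by unfold Spec_deformat_serialized; infer_instance

-- ===== CLAIM =====
def Claim_equal_deformat_serialized : Prop := ∀ (formatted : String), Dom_deformat_serialized formatted → Spec_deformat_serialized formatted (deformat_serialized formatted)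

-- ===== LEMMAS AND PROOFS =====
-- A's fold in the in_label = true state appends the uppercased label slice and resumes,
-- flag false, after the first '=' (or ends): exactly B's label stage.
theorem pvFoldTrue (ts : List String) (acc : List String) :
    (ts.foldl pvStepA (acc, true)).1 =
      (((ts.dropWhile pvNotEq).tail).foldl pvStepA
        (acc ++ (ts.takeWhile pvNotEq).map (fun t => "_" ++ PySem.Str.upper t), false)).1 := by
  induction ts generalizing acc with
  | nil => simp
  | cons t ts ih =>
    by_cases h : t = "="
    · simp [List.foldl_cons, pvStepA, h, pvNotEq]
    · simp [List.foldl_cons, pvStepA, h, pvNotEq, ih, List.append_assoc]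

-- head of a non-empty dropWhile fails the predicate
theorem pvDropWhile_head_false {α : Type} {p : α → Bool} {l : List α}
    {a : α} {l' : List α} (h : l.dropWhile p = a :: l') : p a = false := by
  induction l with
  | nil => simp at h
  | cons x xs ih =>
    by_cases hx : p x
    · rw [List.dropWhile_cons_of_pos hx] at h; exact ih h
    · rw [List.dropWhile_cons_of_neg hx] at h
      cases h; simpa using hx

-- the fold over a run of plain tokens just appends them, staying in the false state
theorem pvPlainFold (pre : List String) (hpre : ∀ t ∈ pre, pvNotOpen t = true) :
    ∀ acc : List String,
      pre.foldl pvStepA (acc, false) = (acc ++ pre.map (fun t => " " ++ t), false) := by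
  induction pre with
  | nil => simp
  | cons t ts iht =>
    intro acc
    have h' : ¬ (PySem.List.pyGet? t.toList 0 = some '[') := by
      have := hpre t (by simp); simp [pvNotOpen] at this; exact this
    simp [List.foldl_cons, pvStepA, h', iht (fun x hx => hpre x (by simp [hx]))]

-- A's fold from the in_label = false state computes B's chunk decomposition.
theorem pvFoldFalse (toks : List String) : ∀ acc : List String,
    (toks.foldl pvStepA (acc, false)).1 = acc ++ pvChunksB toks := by
  induction toks using pvChunksB.induct with
  | case1 toks hrest =>
    intro acc
    rw [pvChunksB.eq_def, hrest]
    have htk : toks.takeWhile pvNotOpen = toks := by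
      have := toks.takeWhile_append_dropWhile (p := pvNotOpen)
      rw [hrest] at this; simpa using this
    have hpre : ∀ t ∈ toks, pvNotOpen t = true := by
      intro t ht; rw [← htk] at ht; exact List.mem_takeWhile_imp ht
    rw [pvPlainFold toks hpre acc, htk]
  | case2 toks opener rest' hrest ih =>
    intro acc
    rw [pvChunksB.eq_def, hrest]
    have hsplit : toks = toks.takeWhile pvNotOpen ++ (opener :: rest') := by
      have := toks.takeWhile_append_dropWhile (p := pvNotOpen)
      rw [hrest] at this; exact this.symm
    have hopen : pvNotOpen opener = false := by
      have hh := pvDropWhile_head_false hrest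
      exact hh
    have hopen' : PySem.List.pyGet? opener.toList 0 = some '[' := by
      simp [pvNotOpen] at hopen; exact hopen
    conv_lhs => rw [hsplit]
    rw [List.foldl_append,
        pvPlainFold _ (fun t ht => List.mem_takeWhile_imp ht) acc]
    simp only [List.foldl_cons]
    have hstep : pvStepA (acc ++ List.map (fun t => " " ++ t) (List.takeWhile pvNotOpen toks), false) opener
        = (acc ++ List.map (fun t => " " ++ t) (List.takeWhile pvNotOpen toks) ++ [" " ++ opener ++ ":"], true) := by
      simp [pvStepA, hopen']
    rw [hstep, pvFoldTrue, ih]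
    simp [List.append_assoc]

-- ===== VERDICT =====
theorem deformat_serialized_spec : Claim_equal_deformat_serialized := by
  intro formatted _
  unfold Spec_deformat_serialized
  simp only [deformat_serialized, deformat_serialized_alt, pvFoldFalse, List.nil_append]
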